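-- pv_equiv track=rewrite | github.com/cyphou/MicroStrategyToPowerBI | powerbi_import/tmdl_generator.py | _fuzzy_match_column
-- ===== SOURCE A (Python) =====
-- def _fuzzy_match_column(level_name, table_col_names):
--     """Try to match a hierarchy level name to a table column by name patterns."""
--     if not level_name or not table_col_names:
--         return None
--     name_lower = level_name.lower().replace(" ", "_")
--     # Exact match (case-insensitive)
--     for col in table_col_names:
--         if col.lower() == name_lower:
--             return col
--     # Match with _ID suffix (e.g., "Quarter" → "QUARTER_ID")
--     for col in table_col_names:
--         if col.lower() == f"{name_lower}_id":
--             return col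
--     # Match as substring (e.g., "Quarter" in "QUARTER_NAME")
--     for col in table_col_names:
--         if name_lower in col.lower():
--             return col
--     return None
-- ===== SOURCE B (Python) =====
-- def _fuzzy_match_column(level_name, table_col_names):
--     """Single pass: exact match returns immediately; first _id and first
--     substring candidates are remembered and chosen by priority at the end."""
--     if not level_name or not table_col_names:
--         return None
--     name_lower = level_name.lower().replace(" ", "_")
--     target_id = name_lower + "_id"
--     first_id = None
--     first_sub = None
--     for col in table_col_names:
--         cl = col.lower()
--         if cl == name_lower:
--             return col
--         if first_id is None and cl == target_id:
--             first_id = col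
--         elif first_sub is None and name_lower in cl:
--             first_sub = col
--     return first_id if first_id is not None else first_sub
-- ===== Notes on version B (the rewrite author's own statement) =====
-- stated objective: faster
-- what changed: A's three sequential tier scans (exact, _id suffix, substring) are merged into one pass that returns early on an exact match and keeps the first _id and first substring candidates, choosing by priority at the end.
import Mathlib
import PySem

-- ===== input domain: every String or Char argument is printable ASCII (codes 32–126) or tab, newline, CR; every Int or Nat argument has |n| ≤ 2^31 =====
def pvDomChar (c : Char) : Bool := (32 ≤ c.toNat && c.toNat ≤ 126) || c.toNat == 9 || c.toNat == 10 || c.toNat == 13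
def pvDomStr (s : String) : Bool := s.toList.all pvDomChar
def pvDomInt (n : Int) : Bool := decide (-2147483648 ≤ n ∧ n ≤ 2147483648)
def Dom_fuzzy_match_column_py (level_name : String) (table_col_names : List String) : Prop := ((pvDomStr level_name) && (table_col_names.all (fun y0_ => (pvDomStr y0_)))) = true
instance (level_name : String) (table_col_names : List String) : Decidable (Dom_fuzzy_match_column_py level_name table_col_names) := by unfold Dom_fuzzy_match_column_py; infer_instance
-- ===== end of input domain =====

-- B replaces A's three sequential scans by one loop that returns on an exact match and
-- otherwise remembers the first _id and first substring candidates (objective: alternative).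

-- ===== PORT A =====
-- three scans in tier order: exact, then "_id" suffix, then substring
def fuzzy_match_column_py (level_name : String) (table_col_names : List String) : Option String :=
  if level_name == "" || table_col_names == [] then none
  else
    let name_lower := PySem.Str.replace (PySem.Str.lower level_name) " " "_"
    match table_col_names.find? (fun col => PySem.Str.lower col == name_lower) with
    | some col => some col
    | none =>
      match table_col_names.find? (fun col => PySem.Str.lower col == name_lower ++ "_id") with
      | some col => some col
      | none =>
        match table_col_names.find? (fun col => PySem.Str.isIn name_lower (PySem.Str.lower col)) with
        | some col => some col
        | none => none

-- ===== PORT B =====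
-- the single loop of Source B: early return on exact, accumulators first_id / first_sub
def fzGo (nl nid : String) : List String → Option String → Option String → Option String
  | [], fid, fsub => match fid with | some c => some c | none => fsub
  | col :: rest, fid, fsub =>
    let cl := PySem.Str.lower col
    if cl == nl then some col
    else if fid.isNone && cl == nid then fzGo nl nid rest (some col) fsub
    else if fsub.isNone && PySem.Str.isIn nl cl then fzGo nl nid rest fid (some col)
    else fzGo nl nid rest fid fsub

def fuzzy_match_column_py_alt (level_name : String) (table_col_names : List String) : Option String :=
  if level_name == "" || table_col_names == [] then none
  else
    let name_lower := PySem.Str.replace (PySem.Str.lower level_name) " " "_"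
    fzGo name_lower (name_lower ++ "_id") table_col_names none none

-- ===== PRECONDITION & SPEC =====
def Spec_fuzzy_match_column_py (level_name : String) (table_col_names : List String) (out : Option String) : Prop := out = fuzzy_match_column_py_alt level_name table_col_names
instance (level_name : String) (table_col_names : List String) (out : Option String) : Decidable (Spec_fuzzy_match_column_py level_name table_col_names out) := by unfold Spec_fuzzy_match_column_py; infer_instance

-- ===== CLAIM (what is proved, stated in full; the proofs are below) =====
def Claim_equal_fuzzy_match_column_py : Prop := ∀ (level_name : String) (table_col_names : List String), Dom_fuzzy_match_column_py level_name table_col_names → Spec_fuzzy_match_column_py level_name table_col_names (fuzzy_match_column_py level_name table_col_names)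

-- ===== LEMMAS AND PROOFS =====

-- characterisation of the single-pass loop in terms of the three tier scans
theorem fzGo_eq (nl nid : String) (xs : List String) (fid fsub : Option String) :
    fzGo nl nid xs fid fsub =
      match xs.find? (fun col => PySem.Str.lower col == nl) with
      | some c => some c
      | none =>
        match fid with
        | some c => some c
        | none =>
          match xs.find? (fun col => PySem.Str.lower col == nid) with
          | some c => some c
          | none =>
            match fsub with
            | some c => some c
            | none => xs.find? (fun col => PySem.Str.isIn nl (PySem.Str.lower col)) := by
  induction xs generalizing fid fsub with
  | nil => cases fid <;> cases fsub <;> simp [fzGo]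
  | cons col rest ih =>
    simp only [fzGo, List.find?]
    by_cases h1 : PySem.Str.lower col == nl
    · simp [h1]
    · simp only [h1, if_false, Bool.false_eq_true]
      by_cases hfid : fid.isNone
      · obtain rfl : fid = none := Option.isNone_iff_eq_none.mp hfid
        by_cases h2 : PySem.Str.lower col == nid
        · simp only [hfid, h2, Bool.and_true, if_true, ih]
        · simp only [hfid, h2, Bool.and_false, if_false, Bool.false_eq_true]
          by_cases hfsub : fsub.isNone
          · obtain rfl : fsub = none := Option.isNone_iff_eq_none.mp hfsub
            by_cases h3 : PySem.Chars.isIn nl.toList (PySem.Chars.lower col.toList) = true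
            · simp [hfsub, h3, ih]
            · simp [hfsub, h3, ih]
          · obtain ⟨c, rfl⟩ : ∃ c, fsub = some c := by
              cases fsub with
              | none => simp at hfsub
              | some c => exact ⟨c, rfl⟩
            simp [ih]
      · obtain ⟨c, rfl⟩ : ∃ c, fid = some c := by
          cases fid with
          | none => simp at hfid
          | some c => exact ⟨c, rfl⟩
        simp only [hfid, Bool.false_and, if_false, Bool.false_eq_true]
        by_cases hfsub : fsub.isNone
        · obtain rfl : fsub = none := Option.isNone_iff_eq_none.mp hfsub
          by_cases h3 : PySem.Chars.isIn nl.toList (PySem.Chars.lower col.toList) = true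
          · simp [hfsub, h3, ih]
          · simp [hfsub, h3, ih]
        · obtain ⟨d, rfl⟩ : ∃ d, fsub = some d := by
            cases fsub with
            | none => simp at hfsub
            | some d => exact ⟨d, rfl⟩
          simp [ih]

-- ===== VERDICT (by name: the statement is the Claim_ definition above) =====
theorem fuzzy_match_column_py_spec : Claim_equal_fuzzy_match_column_py := by
  intro level_name table_col_names _
  unfold Spec_fuzzy_match_column_py fuzzy_match_column_py fuzzy_match_column_py_alt
  by_cases h : level_name == "" || table_col_names == []
  · simp only [Bool.or_eq_true, beq_iff_eq] at h
    simp [h]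
  · simp only [h, if_false, Bool.false_eq_true, fzGo_eq]
    cases table_col_names.find? (fun col => PySem.Str.lower col ==
        PySem.Str.replace (PySem.Str.lower level_name) " " "_") with
    | some c => rfl
    | none =>
      cases table_col_names.find? (fun col => PySem.Str.lower col ==
          PySem.Str.replace (PySem.Str.lower level_name) " " "_" ++ "_id") with
      | some c => rfl
      | none =>
        cases table_col_names.find? (fun col => PySem.Str.isIn
            (PySem.Str.replace (PySem.Str.lower level_name) " " "_") (PySem.Str.lower col)) <;> rfl
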